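-- pv_equiv track=rewrite | github.com/sunghoByun/Python-Tutorial | 프로그래머스/lv.1/모의고사.py | solution
-- ===== SOURCE A (Python) =====
-- def solution(answers):
--     supo1 = [1, 2, 3, 4, 5]
--     supo2 = [2, 1, 2, 3, 2, 4, 2, 5]
--     supo3 = [3, 3, 1, 1, 2, 2, 4, 4, 5, 5]
--
--     ans1,ans2,ans3 = 0,0,0
--
--     for i in range(len(answers)):
--         if supo1[i%len(supo1)] == answers[i]:
--             ans1+=1
--         if supo2[i%len(supo2)] == answers[i]:
--             ans2+=1
--         if supo3[i%len(supo3)] == answers[i]: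
--             ans3+=1
--
--     max_key = max(ans1,ans2,ans3)
--     keys = [ans1,ans2,ans3]
--     max_keys=[]
--     for i in range(len(keys)):
--         if keys[i] == max_key:
--             max_keys.append(i+1)
--
--     return max_keys
-- ===== SOURCE B (Python) =====
-- def solution(answers):
--     # All pattern lengths (5, 8, 10) divide 40, so each pattern's value at
--     # position i depends only on i % 40.  Build one frequency table of
--     # (i % 40, answer) pairs in a single pass; each score is then a sum of
--     # 40 table lookups instead of a scan over the answers.
--     freq = {}
--     for i, a in enumerate(answers):
--         key = (i % 40, a)
--         freq[key] = freq.get(key, 0) + 1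
--     patterns = [[1, 2, 3, 4, 5],
--                 [2, 1, 2, 3, 2, 4, 2, 5],
--                 [3, 3, 1, 1, 2, 2, 4, 4, 5, 5]]
--     scores = [sum(freq.get((r, pat[r % len(pat)]), 0) for r in range(40))
--               for pat in patterns]
--     best = max(scores)
--     return [k + 1 for k, s in enumerate(scores) if s == best]
-- ===== Notes on version B (the rewrite author's own statement) =====
-- stated objective: alternative
-- what changed: Replaces the per-pattern scanning of the answers (three interleaved cyclic counters) by a single pass that builds a frequency table keyed by (i % 40, answer) -- 40 = lcm of the pattern lengths -- so each pattern's score is then a sum of 40 table lookups, followed by max and an enumerate-filter for the winners.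
import Mathlib
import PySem

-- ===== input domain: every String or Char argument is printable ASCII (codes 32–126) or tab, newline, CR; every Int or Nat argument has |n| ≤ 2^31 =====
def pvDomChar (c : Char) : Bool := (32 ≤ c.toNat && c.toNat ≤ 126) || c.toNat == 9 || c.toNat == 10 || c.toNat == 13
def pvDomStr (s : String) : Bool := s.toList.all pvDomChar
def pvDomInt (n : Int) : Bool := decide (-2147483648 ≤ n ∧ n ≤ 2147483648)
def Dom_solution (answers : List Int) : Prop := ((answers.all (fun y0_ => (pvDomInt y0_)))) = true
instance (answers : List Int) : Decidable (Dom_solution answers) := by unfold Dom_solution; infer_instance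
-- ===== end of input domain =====

-- B replaces the per-pattern scanning by one frequency table of (i % 40, answer) pairs
-- (all pattern lengths divide 40), each score becoming a sum of 40 table lookups; same O(n) cost.

-- ===== PORT A =====
-- pat[i % len(pat)]: exact via pyGetD since 0 ≤ i % len < len for the nonempty patterns used
def pvPatAt (pat : List Int) (i : Int) : Int :=
  PySem.List.pyGetD pat (PySem.Int.mod i (pat.length : Int)) 0

def solution (answers : List Int) : List Int :=
  let supo1 : List Int := [1, 2, 3, 4, 5]
  let supo2 : List Int := [2, 1, 2, 3, 2, 4, 2, 5]
  let supo3 : List Int := [3, 3, 1, 1, 2, 2, 4, 4, 5, 5]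
  -- for i in range(len(answers)): three interleaved counters
  let st := (PySem.List.enumerate answers).foldl
    (fun (st : Int × Int × Int) (p : Int × Int) =>
      (if pvPatAt supo1 p.1 = p.2 then st.1 + 1 else st.1,
       if pvPatAt supo2 p.1 = p.2 then st.2.1 + 1 else st.2.1,
       if pvPatAt supo3 p.1 = p.2 then st.2.2 + 1 else st.2.2))
    (0, 0, 0)
  let max_key := max st.1 (max st.2.1 st.2.2)
  let keys := [st.1, st.2.1, st.2.2]
  -- for i in range(len(keys)): if keys[i] == max_key: max_keys.append(i+1)
  (PySem.List.enumerate keys).foldl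
    (fun acc (p : Int × Int) => if p.2 = max_key then acc ++ [p.1 + 1] else acc) []

-- ===== PORT B =====
-- freq[(i % 40, a)] = freq.get((i % 40, a), 0) + 1, one pass over enumerate(answers)
def pvFreq (answers : List Int) : PySem.Dict (Int × Int) Int :=
  (PySem.List.enumerate answers).foldl
    (fun d (p : Int × Int) =>
      d.insert (PySem.Int.mod p.1 40, p.2) (d.getD (PySem.Int.mod p.1 40, p.2) 0 + 1))
    PySem.Dict.empty

-- pat[r % len(pat)] as written in B (same Python subexpression as A's, transliterated separately)
def pvPatAtB (pat : List Int) (r : Int) : Int :=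
  PySem.List.pyGetD pat (PySem.Int.mod r (pat.length : Int)) 0

-- sum(freq.get((r, pat[r % len(pat)]), 0) for r in range(40))
def pvScoreB (freq : PySem.Dict (Int × Int) Int) (pat : List Int) : Int :=
  ((PySem.List.pyRange 0 40 1).map (fun r => freq.getD (r, pvPatAtB pat r) 0)).sum

def solution_alt (answers : List Int) : List Int :=
  let freq := pvFreq answers
  let patterns : List (List Int) :=
    [[1, 2, 3, 4, 5], [2, 1, 2, 3, 2, 4, 2, 5], [3, 3, 1, 1, 2, 2, 4, 4, 5, 5]]
  let scores := patterns.map (fun pat => pvScoreB freq pat)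
  let best := (PySem.List.max? scores (fun y => y)).getD 0  -- scores has 3 elements, max() never raises
  (PySem.List.enumerate scores).filterMap
    (fun p : Int × Int => if p.2 = best then some (p.1 + 1) else none)

-- ===== PRECONDITION & SPEC =====
def Spec_solution (answers : List Int) (out : List Int) : Prop := out = solution_alt answers
instance (answers : List Int) (out : List Int) : Decidable (Spec_solution answers out) := by unfold Spec_solution; infer_instance

-- ===== CLAIM (what is proved, stated in full; the proofs are below) =====
def Claim_equal_solution : Prop := ∀ (answers : List Int), Dom_solution answers → Spec_solution answers (solution answers)

-- ===== LEMMAS AND PROOFS =====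

-- sum of a one-point indicator over a duplicate-free list
theorem pv_sum_single (l : List Int) (i c : Int) (hnd : l.Nodup) (hi : i ∈ l) :
    (l.map (fun r => if r = i then c else (0:Int))).sum = c := by
  induction l with
  | nil => cases hi
  | cons x t ih =>
    rcases List.nodup_cons.mp hnd with ⟨hx, hndt⟩
    rcases List.mem_cons.mp hi with rfl | hi
    · have hz : (t.map (fun r => if r = i then c else (0:Int))).sum = 0 := by
        apply List.sum_eq_zero
        intro y hy
        rcases List.mem_map.mp hy with ⟨r, hr, rfl⟩
        have hne : r ≠ i := fun h => hx (h ▸ hr)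
        simp [hne]
      simp [hz]
    · have hxne : x ≠ i := fun h => hx (h ▸ hi)
      simp only [List.map_cons, List.sum_cons, if_neg hxne, zero_add]
      exact ih hndt hi

-- Σ_{r=0}^{39} [(r, v r) = k] is the indicator of k matching its own residue
theorem pv_sum_pair (v : Int → Int) (k : Int × Int) (h0 : 0 ≤ k.1) (h1 : k.1 < 40) :
    ((PySem.List.pyRange 0 40 1).map
      (fun r => if (r, v r) = k then (1:Int) else 0)).sum
    = if k.2 = v k.1 then 1 else 0 := by
  obtain ⟨i, a⟩ := k
  simp only at h0 h1 ⊢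
  have hmem : i ∈ PySem.List.pyRange 0 40 1 := by
    rw [PySem.List.mem_pyRange_one]; exact ⟨h0, h1⟩
  by_cases ha : a = v i
  · have hf : (fun r => if (r, v r) = (i, a) then (1:Int) else 0)
        = fun r => if r = i then (1:Int) else 0 := by
      funext r
      by_cases hr : r = i
      · subst hr; simp [ha]
      · simp [Prod.ext_iff, hr]
    rw [hf, pv_sum_single _ i 1 (PySem.List.nodup_pyRange_one 0 40) hmem, if_pos ha]
  · rw [if_neg ha]
    apply List.sum_eq_zero
    intro y hy
    rcases List.mem_map.mp hy with ⟨r, _, rfl⟩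
    have : ¬ ((r, v r) = (i, a)) := by
      simp only [Prod.mk.injEq, not_and]
      rintro rfl h; exact ha h.symm
    simp [this]

-- summing counter lookups over all 40 residues counts the matching pairs
theorem pv_sum_count (ks : List (Int × Int)) (v : Int → Int)
    (h : ∀ k ∈ ks, 0 ≤ k.1 ∧ k.1 < 40) :
    ((PySem.List.pyRange 0 40 1).map (fun r => ((ks.count (r, v r) : Int)))).sum
    = ((ks.countP (fun k => k.2 == v k.1) : Int)) := by
  induction ks with
  | nil => simp
  | cons k t ih =>
    have hk := h k (List.mem_cons_self)
    have ht : ∀ k' ∈ t, 0 ≤ k'.1 ∧ k'.1 < 40 := fun k' hk' => h k' (List.mem_cons_of_mem _ hk')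
    have hcount : ∀ r : Int, ((k :: t).count (r, v r) : Int)
        = (t.count (r, v r) : Int) + (if (r, v r) = k then (1:Int) else 0) := by
      intro r
      rw [List.count_cons]
      by_cases hrk : (r, v r) = k
      · simp [← hrk]
      · have hne : k ≠ (r, v r) := fun h => hrk h.symm
        simp [hrk, hne]
    simp only [hcount]
    rw [List.sum_map_add]
    rw [ih ht, pv_sum_pair v k hk.1 hk.2, List.countP_cons]
    by_cases hm : k.2 = v k.1 <;> simp [hm]

-- the combined (i % 40)-key agrees with the direct i-index for a pattern whose length divides 40
theorem pvPatAt_mod40 (pat : List Int) (i : Int)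
    (hdvd : ((pat.length : Int)) ∣ 40) (hpos : 0 < (pat.length : Int)) :
    pvPatAt pat (PySem.Int.mod i 40) = pvPatAt pat i := by
  unfold pvPatAt
  congr 1
  rw [PySem.Int.mod_eq_emod_of_pos hpos, PySem.Int.mod_eq_emod_of_pos hpos,
      PySem.Int.mod_eq_emod_of_pos (show (0:Int) < 40 by norm_num)]
  exact Int.emod_emod_of_dvd i hdvd

-- B's table-lookup score equals the direct match count over enumerate(answers)
theorem pvScoreB_eq (answers pat : List Int)
    (hdvd : ((pat.length : Int)) ∣ 40) (hpos : 0 < (pat.length : Int)) :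
    pvScoreB (pvFreq answers) pat
    = ((PySem.List.enumerate answers).map
        (fun p : Int × Int => if p.2 = pvPatAt pat p.1 then (1:Int) else 0)).sum := by
  have hfreq : pvFreq answers
      = PySem.Dict.counter ((PySem.List.enumerate answers).map
          (fun p : Int × Int => (PySem.Int.mod p.1 40, p.2))) := by
    unfold pvFreq
    rw [← PySem.Dict.foldl_insert_getD_add_one_eq_counter, List.foldl_map]
  have hks : ∀ k ∈ (PySem.List.enumerate answers).map
      (fun p : Int × Int => (PySem.Int.mod p.1 40, p.2)), 0 ≤ k.1 ∧ k.1 < 40 := by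
    intro k hk
    rcases List.mem_map.mp hk with ⟨p, _, rfl⟩
    exact ⟨PySem.Int.mod_nonneg _ (by norm_num), PySem.Int.mod_lt _ (by norm_num)⟩
  unfold pvScoreB
  have hAB : ∀ r, pvPatAtB pat r = pvPatAt pat r := fun _ => rfl
  simp only [hfreq, PySem.Dict.getD_counter, hAB]
  rw [pv_sum_count _ (fun r => pvPatAt pat r) hks]
  rw [List.countP_map]
  rw [← PySem.List.sum_map_ite_one_zero
        ((fun k : Int × Int => k.2 == pvPatAt pat k.1) ∘
          fun p : Int × Int => (PySem.Int.mod p.1 40, p.2))]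
  refine congrArg List.sum (List.map_congr_left ?_)
  intro p _
  have h40 := pvPatAt_mod40 pat p.1 hdvd hpos
  simp only [Function.comp, beq_iff_eq, h40]

-- A's interleaved triple fold equals the three independent per-pattern sums
theorem pvFold_eq_scores (l : List (Int × Int)) (p1 p2 p3 : List Int) (a b c : Int) :
    l.foldl
      (fun (st : Int × Int × Int) (p : Int × Int) =>
        (if pvPatAt p1 p.1 = p.2 then st.1 + 1 else st.1,
         if pvPatAt p2 p.1 = p.2 then st.2.1 + 1 else st.2.1,
         if pvPatAt p3 p.1 = p.2 then st.2.2 + 1 else st.2.2)) (a, b, c)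
    = (a + (l.map (fun p => if p.2 = pvPatAt p1 p.1 then (1:Int) else 0)).sum,
       b + (l.map (fun p => if p.2 = pvPatAt p2 p.1 then (1:Int) else 0)).sum,
       c + (l.map (fun p => if p.2 = pvPatAt p3 p.1 then (1:Int) else 0)).sum) := by
  induction l generalizing a b c with
  | nil => simp
  | cons x t ih =>
    simp only [List.foldl_cons, List.map_cons, List.sum_cons, ih, Prod.mk.injEq]
    refine ⟨?_, ?_, ?_⟩ <;> split_ifs <;> omega

theorem solution_eq_alt (answers : List Int) : solution answers = solution_alt answers := by
  unfold solution solution_alt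
  simp only [List.map_cons, List.map_nil,
    pvScoreB_eq answers [1,2,3,4,5] (by norm_num) (by norm_num),
    pvScoreB_eq answers [2,1,2,3,2,4,2,5] (by norm_num) (by norm_num),
    pvScoreB_eq answers [3,3,1,1,2,2,4,4,5,5] (by norm_num) (by norm_num)]
  simp only [pvFold_eq_scores, zero_add]
  set c1 := ((PySem.List.enumerate answers).map
      (fun p : Int × Int => if p.2 = pvPatAt [1,2,3,4,5] p.1 then (1:Int) else 0)).sum with hc1
  set c2 := ((PySem.List.enumerate answers).map
      (fun p : Int × Int => if p.2 = pvPatAt [2,1,2,3,2,4,2,5] p.1 then (1:Int) else 0)).sum with hc2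
  set c3 := ((PySem.List.enumerate answers).map
      (fun p : Int × Int => if p.2 = pvPatAt [3,3,1,1,2,2,4,4,5,5] p.1 then (1:Int) else 0)).sum with hc3
  simp only [PySem.List.max?_id_cons, List.foldl_cons, List.foldl_nil,
    PySem.List.enumerate_cons, PySem.List.enumerate_nil, List.filterMap,
    Option.getD_some]
  have hmax : max c1 (max c2 c3) = max (max c1 c2) c3 := (max_assoc c1 c2 c3).symm
  rw [hmax]
  split_ifs <;> rfl

-- ===== VERDICT (by name: the statement is the Claim_ definition above) =====
theorem solution_spec : Claim_equal_solution := by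
  intro answers _
  unfold Spec_solution
  exact solution_eq_alt answers
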